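-- pv_equiv track=rewrite | github.com/kimkihyun1/TIL | CodingTest/2308/230803.py | solution
-- ===== SOURCE A (Python) =====
-- def solution(input_string):
--     answer = ''
--     alpha_dict = {}
--     answer_list = []
--
--     for idx, alpha in enumerate(input_string):
--         if alpha not in alpha_dict:
--             alpha_dict[alpha] = [idx]
--         else:
--             alpha_dict[alpha].append(idx)
--
--     for k, v in alpha_dict.items():
--         if len(v) >= 2:
--             for i in range(len(v) - 1):
--                 if abs(v[i] - v[i + 1]) > 1:
--                     answer_list.append(k)
--                     break
--
--     if len(answer_list) == 0:
--         answer = 'N'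
--     else:
--         answer = ''.join(sorted(answer_list))
--
--     return answer
-- ===== SOURCE B (Python) =====
-- def solution(input_string):
--     last = {}
--     bad = set()
--     for idx, ch in enumerate(input_string):
--         if ch in last and idx - last[ch] > 1:
--             bad.add(ch)
--         last[ch] = idx
--     if not bad:
--         return 'N'
--     return ''.join(sorted(bad))
-- ===== Notes on version B (the rewrite author's own statement) =====
-- stated objective: simpler
-- what changed: Instead of building full per-character position lists and then rescanning each list for a gap, B streams once over the string keeping only each character's last-seen index and a set of characters already found non-consecutive.
import Mathlib
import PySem

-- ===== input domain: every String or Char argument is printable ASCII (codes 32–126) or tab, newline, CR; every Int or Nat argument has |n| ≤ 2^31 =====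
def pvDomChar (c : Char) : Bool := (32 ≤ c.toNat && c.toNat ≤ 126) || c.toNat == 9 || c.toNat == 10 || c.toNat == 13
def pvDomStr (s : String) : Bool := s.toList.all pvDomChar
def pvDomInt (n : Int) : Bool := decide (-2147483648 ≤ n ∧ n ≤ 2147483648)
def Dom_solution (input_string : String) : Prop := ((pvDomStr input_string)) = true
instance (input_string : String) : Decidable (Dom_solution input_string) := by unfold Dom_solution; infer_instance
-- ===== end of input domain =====

-- B replaces A's build-all-position-lists-then-rescan with one streaming pass keeping only
-- each character's last index and a set of characters already found non-consecutive.

-- ===== PORT A =====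
-- inner loop 'for i in range(len(v)-1): if abs(v[i]-v[i+1])>1: append; break'
-- (indices produced by range(len(v)-1) are always in range, so pyGetD's default is never read)
def hasGapA (v : List Int) : Bool :=
  (PySem.List.pyRange 0 ((v.length : Int) - 1) 1).any
    (fun i => decide (((PySem.List.pyGetD v i 0) - (PySem.List.pyGetD v (i + 1) 0)).natAbs > 1))

def solution (input_string : String) : String :=
  let alpha_dict : PySem.Dict Char (List Int) :=
    (PySem.List.enumerate input_string.toList 0).foldl
      (fun d p =>
        match d.get? p.2 with
        | none => d.insert p.2 [p.1]
        | some v => d.insert p.2 (v ++ [p.1]))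
      PySem.Dict.empty
  let answer_list : List Char :=
    alpha_dict.items.foldl
      (fun acc kv => if kv.2.length ≥ 2 && hasGapA kv.2 then acc ++ [kv.1] else acc) []
  if answer_list.length = 0 then "N"
  else String.mk (PySem.List.sorted answer_list (fun x => x) false)

-- ===== PORT B =====
def stepB (st : PySem.Dict Char Int × PySem.Set Char) (p : Int × Char) :
    PySem.Dict Char Int × PySem.Set Char :=
  let bad := if st.1.contains p.2 && decide (p.1 - st.1.getD p.2 0 > 1)
             then PySem.Set.add st.2 p.2 else st.2
  (st.1.insert p.2 p.1, bad)

def solution_alt (input_string : String) : String :=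
  let st := (PySem.List.enumerate input_string.toList 0).foldl stepB
    (PySem.Dict.empty, PySem.Set.empty)
  if st.2.isEmpty then "N"
  else String.mk (PySem.List.sorted st.2 (fun x => x) false)

-- ===== PRECONDITION & SPEC =====
def Spec_solution (input_string : String) (out : String) : Prop := out = solution_alt input_string
instance (input_string : String) (out : String) : Decidable (Spec_solution input_string out) := by unfold Spec_solution; infer_instance

-- ===== CLAIM (what is proved, stated in full; the proofs are below) =====
def Claim_equal_solution : Prop := ∀ (input_string : String), Dom_solution input_string → Spec_solution input_string (solution input_string)

-- ===== LEMMAS AND PROOFS =====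

-- positions at which character c occurs in the enumerated list
def occ (l : List (Int × Char)) (c : Char) : List Int :=
  (l.filter (fun p => p.2 == c)).map (·.1)

-- some adjacent pair of positions is more than 1 apart
def gapAdj : List Int → Bool
  | a :: b :: t => decide (b - a > 1) || gapAdj (b :: t)
  | _ => false

lemma occ_append_singleton (m : List (Int × Char)) (p : Int × Char) (c : Char) :
    occ (m ++ [p]) c = occ m c ++ (if p.2 = c then [p.1] else []) := by
  simp only [occ, List.filter_append, List.map_append]
  by_cases h : p.2 = c <;> simp [h]

lemma gapAdj_append (v : List Int) (x : Int) :
    gapAdj (v ++ [x]) =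
      (gapAdj v || match v.getLast? with
        | some j => decide (x - j > 1)
        | none => false) := by
  induction v with
  | nil => simp [gapAdj]
  | cons a w ih =>
    cases w with
    | nil => simp [gapAdj]
    | cons b w' =>
      simp only [List.cons_append, gapAdj] at ih ⊢
      rw [ih]
      simp [Bool.or_assoc]

lemma gapAdj_iff_exists (v : List Int) :
    gapAdj v = true ↔ ∃ i, ∃ h : i + 1 < v.length, v[i + 1] - v[i] > 1 := by
  induction v with
  | nil => simp [gapAdj]
  | cons a w ih =>
    cases w with
    | nil => simp [gapAdj]
    | cons b w' =>
      simp only [gapAdj, Bool.or_eq_true, decide_eq_true_eq, ih]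
      constructor
      · rintro (h | ⟨i, hi, hgt⟩)
        · exact ⟨0, by simp, by simpa using h⟩
        · exact ⟨i + 1, by simpa using hi, by simpa using hgt⟩
      · rintro ⟨i, hi, hgt⟩
        cases i with
        | zero => left; simpa using hgt
        | succ j => right; exact ⟨j, by simpa using hi, by simpa using hgt⟩

lemma gapAdj_two_le (v : List Int) (h : gapAdj v = true) : 2 ≤ v.length := by
  rw [gapAdj_iff_exists] at h
  obtain ⟨i, hi, _⟩ := h
  omega

lemma hasGapA_eq_gapAdj (v : List Int) (h : v.Pairwise (· < ·)) :
    hasGapA v = gapAdj v := by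
  rw [Bool.eq_iff_iff, gapAdj_iff_exists]
  unfold hasGapA
  rw [List.any_eq_true]
  rw [List.pairwise_iff_getElem] at h
  constructor
  · rintro ⟨i, hmem, hp⟩
    rw [PySem.List.mem_pyRange_one] at hmem
    obtain ⟨h0, hlt⟩ := hmem
    obtain ⟨k, rfl⟩ : ∃ k : Nat, i = (k : Int) := ⟨i.toNat, by omega⟩
    have hk1 : k + 1 < v.length := by omega
    refine ⟨k, hk1, ?_⟩
    have hc : (k : Int) + 1 = ((k + 1 : Nat) : Int) := by push_cast; ring
    rw [hc, PySem.List.pyGetD_natCast, PySem.List.pyGetD_natCast,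
        List.getD_eq_getElem v 0 (by omega), List.getD_eq_getElem v 0 hk1] at hp
    simp only [decide_eq_true_eq] at hp
    have := h k (k + 1) (by omega) hk1 (by omega)
    omega
  · rintro ⟨i, hi, hgt⟩
    refine ⟨(i : Int), ?_, ?_⟩
    · rw [PySem.List.mem_pyRange_one]; omega
    · have hc : (i : Int) + 1 = ((i + 1 : Nat) : Int) := by push_cast; ring
      rw [hc, PySem.List.pyGetD_natCast, PySem.List.pyGetD_natCast,
          List.getD_eq_getElem v 0 (by omega), List.getD_eq_getElem v 0 hi]
      simp only [decide_eq_true_eq]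
      have := h i (i + 1) (by omega) hi (by omega)
      omega

-- B's loop invariant: the last-seen dict holds the last position of each seen character,
-- and the bad set holds exactly the characters whose position list has an adjacent gap.
lemma invB (l : List (Int × Char)) :
    (∀ c, (l.foldl stepB (PySem.Dict.empty, PySem.Set.empty)).1.get? c = (occ l c).getLast?)
    ∧ (∀ c, c ∈ (l.foldl stepB (PySem.Dict.empty, PySem.Set.empty)).2 ↔ gapAdj (occ l c) = true)
    ∧ (l.foldl stepB (PySem.Dict.empty, PySem.Set.empty)).2.Nodup := by
  induction l using List.reverseRecOn with
  | nil =>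
    refine ⟨fun c => ?_, fun c => ?_, ?_⟩ <;>
      simp [occ, gapAdj, PySem.Dict.get?_empty, PySem.Set.empty]
  | append_singleton m p ih =>
    obtain ⟨ih1, ih2, ih3⟩ := ih
    rw [List.foldl_append] at *
    set st := m.foldl stepB (PySem.Dict.empty, PySem.Set.empty) with hst
    simp only [List.foldl_cons, List.foldl_nil]
    have hcont : st.1.contains p.2 = ((occ m p.2).getLast?).isSome := by
      rw [PySem.Dict.contains_eq_isSome_get?, ih1]
    refine ⟨fun c => ?_, fun c => ?_, ?_⟩
    · simp only [stepB, PySem.Dict.get?_insert]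
      by_cases hc : c = p.2
      · subst hc
        rw [occ_append_singleton, if_pos rfl, if_pos rfl, List.getLast?_concat]
      · rw [if_neg hc, occ_append_singleton, if_neg (fun h => hc h.symm)]
        simpa using ih1 c
    · simp only [stepB]
      by_cases hc : c = p.2
      · subst hc
        rw [occ_append_singleton, if_pos rfl, gapAdj_append]
        cases hl : (occ m p.2).getLast? with
        | none =>
          rw [hcont, hl]
          simp only [Option.isSome_none, Bool.false_and, Bool.false_eq_true, if_false]
          simpa [hl] using ih2 p.2
        | some j =>
          rw [hcont, hl]
          simp only [Option.isSome_some, Bool.true_and]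
          have hgd : st.1.getD p.2 0 = j := by
            rw [PySem.Dict.getD_eq_get?_getD, ih1, hl]; rfl
          rw [hgd]
          by_cases hgt : p.1 - j > 1
          · rw [if_pos (by simpa using hgt)]
            simp [PySem.Set.mem_add, ih2 p.2, hgt]
          · rw [if_neg (by simpa using hgt)]
            simp [ih2 p.2, hgt]
      · have hocc : occ (m ++ [p]) c = occ m c := by
          rw [occ_append_singleton, if_neg (fun h => hc h.symm)]; simp
        rw [hocc]
        split
        · rw [PySem.Set.mem_add]
          simp [ih2 c, hc]
        · exact ih2 c
    · simp only [stepB]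
      split
      · exact PySem.Set.nodup_add _ _ ih3
      · exact ih3
-- characterisation of A's answer_list as a filter of the distinct characters
lemma occ_pairwise (cs : List Char) (c : Char) :
    (occ (PySem.List.enumerate cs 0) c).Pairwise (· < ·) := by
  exact List.Pairwise.map _ (fun a b h => h)
    ((PySem.List.pairwise_lt_enumerate cs 0).filter _)

lemma mem_of_gapAdj_occ (cs : List Char) (c : Char)
    (h : gapAdj (occ (PySem.List.enumerate cs 0) c) = true) : c ∈ cs := by
  have h2 := gapAdj_two_le _ h
  rw [occ] at h2
  simp only [List.length_map] at h2
  rcases hf : (PySem.List.enumerate cs 0).filter (fun p => p.2 == c) with _ | ⟨q, t⟩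
  · rw [hf] at h2; simp at h2
  · have hq : q ∈ (PySem.List.enumerate cs 0).filter (fun p => p.2 == c) := by
      rw [hf]; exact List.mem_cons_self
    rw [List.mem_filter] at hq
    have : q.2 ∈ cs := by
      have := List.mem_map_of_mem (f := fun p => p.2) hq.1
      rwa [PySem.List.map_snd_enumerate] at this
    have hqc : q.2 = c := by simpa using hq.2
    exact hqc ▸ this

lemma answer_list_eq (cs : List Char) :
    ((PySem.List.enumerate cs 0).foldl
        (fun d p =>
          match d.get? p.2 with
          | none => d.insert p.2 [p.1]
          | some v => d.insert p.2 (v ++ [p.1]))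
        PySem.Dict.empty).items.foldl
      (fun acc kv => if kv.2.length ≥ 2 && hasGapA kv.2 then acc ++ [kv.1] else acc) [] =
    (PySem.Set.ofList cs).filter
      (fun k => gapAdj (occ (PySem.List.enumerate cs 0) k)) := by
  set l := PySem.List.enumerate cs 0 with hl
  have hfun : (fun (d : PySem.Dict Char (List Int)) (p : Int × Char) =>
      match d.get? p.2 with
      | none => d.insert p.2 [p.1]
      | some v => d.insert p.2 (v ++ [p.1])) =
      (fun d p => d.modify p.2 [] (· ++ [p.1])) := by
    funext d p
    cases h : d.get? p.2 <;>
      simp [PySem.Dict.modify, PySem.Dict.getD_eq_get?_getD, h]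
  rw [hfun]
  have hmap : l.foldl (fun d p => d.modify p.2 [] (· ++ [p.1])) PySem.Dict.empty =
      (l.map (fun p => (p.2, p.1))).foldl
        (fun d q => d.modify q.1 [] (· ++ [q.2])) PySem.Dict.empty := by
    rw [List.foldl_map]
  rw [hmap]
  set d := (l.map (fun p => (p.2, p.1))).foldl
      (fun d q => d.modify q.1 [] (· ++ [q.2])) PySem.Dict.empty with hd
  have hkeys : d.keys = PySem.Set.ofList cs := by
    rw [hd, PySem.Dict.keys_foldl_modify_key _ Prod.fst [] (fun _ q => (· ++ [q.2]))]
    rw [List.map_map]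
    have : (Prod.fst ∘ fun p : Int × Char => (p.2, p.1)) = fun p : Int × Char => p.2 := rfl
    rw [this, hl, PySem.List.map_snd_enumerate]
    simp only [PySem.Dict.keys_empty]
    exact PySem.Set.update_nil_left cs
  have hnd : d.keys.Nodup := by
    rw [hd]
    exact PySem.Dict.nodup_keys_foldl_modify_key _ Prod.fst [] _ _ (by simp [PySem.Dict.keys_empty])
  have hgetD : ∀ c, d.getD c [] = occ l c := by
    intro c
    rw [hd, PySem.Dict.getD_foldl_modify_append]
    rw [List.filter_map, List.map_map]
    simp [occ, PySem.Dict.getD_empty, Function.comp_def]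
  rw [PySem.Dict.items_eq_map_keys d hnd []]
  rw [PySem.List.foldl_append_if
    (fun kv : Char × List Int => decide (kv.2.length ≥ 2) && hasGapA kv.2) Prod.fst]
  rw [List.filter_map, List.map_map]
  simp only [Function.comp_def, hgetD]
  rw [hkeys]
  have : (fun k => decide ((occ l k).length ≥ 2) && hasGapA (occ l k)) =
      (fun k => gapAdj (occ l k)) := by
    funext k
    rw [hasGapA_eq_gapAdj _ (hl ▸ occ_pairwise cs k)]
    cases hg : gapAdj (occ l k)
    · simp
    · simp [gapAdj_two_le _ hg]
  simp only [List.map_id', this, List.nil_append]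

-- ===== VERDICT (by name: the statement is the Claim_ definition above) =====
theorem solution_spec : Claim_equal_solution := by
  intro s _
  unfold Spec_solution solution solution_alt
  simp only []
  set cs := s.toList with hcs
  set l := PySem.List.enumerate cs 0 with hl
  obtain ⟨_, hmem, hnd⟩ := invB l
  rw [answer_list_eq cs]
  set A := (PySem.Set.ofList cs).filter (fun k => gapAdj (occ l k)) with hA
  set B := (l.foldl stepB (PySem.Dict.empty, PySem.Set.empty)).2 with hB
  have hAnd : A.Nodup := (PySem.Set.nodup_ofList cs).filter _
  have hmemA : ∀ c, c ∈ A ↔ gapAdj (occ l c) = true := by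
    intro c
    rw [hA, List.mem_filter, PySem.Set.mem_ofList]
    exact ⟨fun h => h.2, fun h => ⟨mem_of_gapAdj_occ cs c h, h⟩⟩
  have hperm : A.Perm B := by
    rw [List.perm_ext_iff_of_nodup hAnd hnd]
    intro c
    rw [hmemA c, hmem c]
  have hlen : A.length = B.length := hperm.length_eq
  have hsorted := PySem.List.sorted_eq_sorted_of_perm A B (fun x => x)
    (fun _ _ h => h) hperm
  by_cases hz : A.length = 0
  · rw [if_pos hz, if_pos (by rw [List.isEmpty_iff, ← List.length_eq_zero_iff]; omega)]
  · rw [if_neg hz, if_neg (by rw [List.isEmpty_iff, ← List.length_eq_zero_iff]; omega)]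
    rw [hsorted]
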